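-- pv_equiv track=rewrite | github.com/kaleidoscopeAI/final | drug_screen.py | analyze_interactions
-- ===== SOURCE A (Python) =====
-- def analyze_interactions(binding_modes):
--     # Analyze types of interactions
--     interactions = []
--     for mode in binding_modes:
--         if mode['distance'] < 3:
--             interactions.append('hydrogen_bond')
--         elif mode['distance'] < 5:
--             interactions.append('hydrophobic')
--         else:
--             interactions.append('weak_interaction')
--     return interactions
-- ===== SOURCE B (Python) =====
-- def analyze_interactions(binding_modes):
--     # Coarse-to-fine staged rewrite: start with the coarsest label for every
--     # mode, then successive passes overwrite entries whose distance clears a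
--     # tighter threshold.
--     distances = [mode['distance'] for mode in binding_modes]
--     out = ['weak_interaction'] * len(distances)
--     out = ['hydrophobic' if d < 5 else label for d, label in zip(distances, out)]
--     out = ['hydrogen_bond' if d < 3 else label for d, label in zip(distances, out)]
--     return out
-- ===== Notes on version B (the rewrite author's own statement) =====
-- stated objective: alternative
-- what changed: Replaced the single-pass if/elif/else accumulator loop with coarse-to-fine staged rewrite passes: extract distances once, initialize every slot to 'weak_interaction', then one whole-list pass overwrites slots with 'hydrophobic' where d < 5 and a final pass overwrites with 'hydrogen_bond' where d < 3.
import Mathlib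
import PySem

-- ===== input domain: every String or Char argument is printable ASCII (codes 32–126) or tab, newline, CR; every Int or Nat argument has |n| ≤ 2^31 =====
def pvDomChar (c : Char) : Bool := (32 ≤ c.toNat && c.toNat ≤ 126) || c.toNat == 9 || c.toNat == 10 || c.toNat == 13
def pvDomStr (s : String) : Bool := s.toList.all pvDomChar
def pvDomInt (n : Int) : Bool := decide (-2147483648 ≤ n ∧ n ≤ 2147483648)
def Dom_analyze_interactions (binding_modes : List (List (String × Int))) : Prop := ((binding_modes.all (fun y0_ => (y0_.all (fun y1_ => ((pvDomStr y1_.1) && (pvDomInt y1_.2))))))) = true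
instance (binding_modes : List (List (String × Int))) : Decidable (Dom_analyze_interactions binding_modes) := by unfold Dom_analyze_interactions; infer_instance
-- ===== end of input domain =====

-- B replaces A's single-pass if/elif accumulator loop with coarse-to-fine staged
-- rewrite passes over whole lists (alternative decomposition; same cost).

-- mode['distance']: first matching key in the association list (KeyError if absent → Pre_)
def pvModeGet? (mode : List (String × Int)) : Option Int :=
  (mode.find? (fun kv => kv.1 == "distance")).map (·.2)

-- ===== PORT A =====
-- A: accumulator list, for-loop, if/elif/else appending a label per mode.
def analyze_interactions (binding_modes : List (List (String × Int))) : List String :=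
  binding_modes.foldl
    (fun interactions mode =>
      match pvModeGet? mode with
      | none => interactions  -- unreachable under Pre_ (Python raises KeyError)
      | some d =>
        if d < 3 then interactions ++ ["hydrogen_bond"]
        else if d < 5 then interactions ++ ["hydrophobic"]
        else interactions ++ ["weak_interaction"])
    []

-- ===== PORT B =====
-- B: extract distances, fill with the coarsest label, then two overwrite passes.
def analyze_interactions_alt (binding_modes : List (List (String × Int))) : List String :=
  let distances := binding_modes.map pvModeGet?
  let out0 := List.replicate distances.length "weak_interaction"
  let out1 := (distances.zip out0).map (fun p =>
    match p.1 with
    | some d => if d < 5 then "hydrophobic" else p.2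
    | none => p.2)  -- none unreachable under Pre_ (Python raises KeyError while extracting)
  let out2 := (distances.zip out1).map (fun p =>
    match p.1 with
    | some d => if d < 3 then "hydrogen_bond" else p.2
    | none => p.2)
  out2

-- ===== PRECONDITION & SPEC =====
-- Pre_: every mode carries a 'distance' key; otherwise both Pythons raise KeyError.
def Pre_analyze_interactions (binding_modes : List (List (String × Int))) : Prop :=
  (binding_modes.all (fun mode => mode.any (fun kv => kv.1 == "distance"))) = true
instance (binding_modes : List (List (String × Int))) : Decidable (Pre_analyze_interactions binding_modes) := by unfold Pre_analyze_interactions; infer_instance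

def pvWitness_analyze_interactions : (List (List (String × Int))) :=
  [[("distance", 2)], [("distance", 4)], [("distance", 7)]]

def Spec_analyze_interactions (binding_modes : List (List (String × Int))) (out : List String) : Prop := out = analyze_interactions_alt binding_modes
instance (binding_modes : List (List (String × Int))) (out : List String) : Decidable (Spec_analyze_interactions binding_modes out) := by unfold Spec_analyze_interactions; infer_instance

-- ===== CLAIM (what is proved, stated in full; the proofs are below) =====
def Claim_equal_analyze_interactions : Prop := ∀ (binding_modes : List (List (String × Int))), Dom_analyze_interactions binding_modes → Pre_analyze_interactions binding_modes → Spec_analyze_interactions binding_modes (analyze_interactions binding_modes)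

-- ===== LEMMAS AND PROOFS =====

-- the label B's staged passes end up writing for one (optional) distance
def pvStagedLabel (d? : Option Int) : String :=
  match d? with
  | some d =>
    if d < 3 then "hydrogen_bond"
    else if d < 5 then "hydrophobic" else "weak_interaction"
  | none => "weak_interaction"

-- B's staged whole-list passes compute the pointwise staged label
lemma alt_eq_map (binding_modes : List (List (String × Int))) :
    analyze_interactions_alt binding_modes
      = binding_modes.map (fun m => pvStagedLabel (pvModeGet? m)) := by
  induction binding_modes with
  | nil => rfl
  | cons m rest ih =>
    simp only [analyze_interactions_alt, List.map_cons, List.length_cons,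
      List.replicate_succ, List.zip_cons_cons] at ih ⊢
    refine congrArg₂ List.cons ?_ ih
    rcases h : pvModeGet? m with _ | d
    · simp [pvStagedLabel]
    · simp only [pvStagedLabel]

-- A's foldl-with-append accumulates exactly the staged labels, given every mode has the key
lemma fold_eq (binding_modes : List (List (String × Int))) (acc : List String)
    (h : Pre_analyze_interactions binding_modes) :
    binding_modes.foldl
      (fun interactions mode =>
        match pvModeGet? mode with
        | none => interactions
        | some d =>
          if d < 3 then interactions ++ ["hydrogen_bond"]
          else if d < 5 then interactions ++ ["hydrophobic"]
          else interactions ++ ["weak_interaction"])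
      acc = acc ++ binding_modes.map (fun m => pvStagedLabel (pvModeGet? m)) := by
  induction binding_modes generalizing acc with
  | nil => simp
  | cons m rest ih =>
    simp only [Pre_analyze_interactions, List.all_cons, Bool.and_eq_true] at h
    obtain ⟨hm, hrest⟩ := h
    have hget : ∃ d, pvModeGet? m = some d := by
      simp only [List.any_eq_true] at hm
      obtain ⟨kv, hkv, hk⟩ := hm
      rcases hfind : m.find? (fun kv => kv.1 == "distance") with _ | p
      · have := List.find?_eq_none.mp hfind kv hkv
        simp [hk] at this
      · exact ⟨p.2, by simp [pvModeGet?, hfind]⟩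
    obtain ⟨d, hd⟩ := hget
    simp only [List.foldl_cons, List.map_cons, hd, pvStagedLabel]
    split_ifs with h3 h5 <;> rw [ih _ hrest] <;> simp [pvStagedLabel]

-- ===== VERDICT (by name: the statement is the Claim_ definition above) =====
theorem analyze_interactions_spec : Claim_equal_analyze_interactions := by
  intro bm _ hpre
  show analyze_interactions bm = analyze_interactions_alt bm
  rw [alt_eq_map]
  unfold analyze_interactions
  simpa using fold_eq bm [] hpre
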